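-- pv_equiv track=rewrite | github.com/agent-fox-dev/agent-fox-v3 | agent_fox/ui/progress.py | abbreviate_arg
-- ===== SOURCE A (Python) =====
-- def abbreviate_arg(raw: str, max_len: int = 60) -> str:
--     """Shorten a tool argument for display.
--
--     - File paths: keep as many trailing path components as fit within
--       max_len, prefixed with ``…/``. Falls back to basename only if
--       even ``…/parent/basename`` exceeds max_len. If the path already
--       fits within max_len, return it as-is.
--     - Other strings: truncate to max_len with ``...`` suffix.
--     - Empty strings: return as-is.
--
--     Algorithm for paths:
--     1. If the full path already fits, return it unchanged.
--     2. Split on separator. Collect components from the right.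
--     3. Build candidate = ``…/`` + ``comp_n/.../basename``.
--     4. While candidate length > max_len, drop the leftmost included
--        component.
--     5. If only the basename remains and it still exceeds max_len,
--        truncate the basename itself with ``...``.
--     """
--     if not raw:
--         return raw
--
--     # Detect file paths
--     is_path = "/" in raw or "\\" in raw
--     if is_path:
--         # If the path already fits, return as-is
--         if len(raw) <= max_len:
--             return raw
--
--         # Split on the appropriate separator
--         if "\\" in raw:
--             parts = [p for p in raw.replace("\\", "/").split("/") if p]
--         else:
--             parts = [p for p in raw.split("/") if p]
--
--         if not parts:
--             return raw
--
--         basename = parts[-1]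
--
--         # Try to fit as many trailing components as possible with …/ prefix
--         prefix = "…/"
--
--         # Start with just the basename
--         included = [basename]
--         for i in range(len(parts) - 2, -1, -1):
--             candidate_parts = [parts[i]] + included
--             candidate = prefix + "/".join(candidate_parts)
--             if len(candidate) <= max_len:
--                 included = candidate_parts
--             else:
--                 break
--
--         if len(included) > 1 or (len(included) == 1 and included[0] != basename):
--             result = prefix + "/".join(included)
--             if len(result) <= max_len:
--                 return result
--
--         # Fall back to basename only
--         if len(basename) <= max_len:
--             return basename
--
--         # Basename itself exceeds max_len — truncate it
--         if max_len >= 4: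
--             return basename[: max_len - 3] + "..."
--         return basename[:max_len]
--
--     # Truncate long non-path strings
--     if len(raw) > max_len:
--         return raw[: max_len - 3] + "..."
--
--     return raw
-- ===== SOURCE B (Python) =====
-- def abbreviate_arg(raw: str, max_len: int = 60) -> str:
--     if not raw:
--         return raw
--     if "/" not in raw and "\\" not in raw:
--         if len(raw) > max_len:
--             return raw[: max_len - 3] + "..."
--         return raw
--     if len(raw) <= max_len:
--         return raw
--     parts = [p for p in raw.replace("\\", "/").split("/") if p]
--     if not parts:
--         return raw
--     # cost[j] = len("…/" + "/".join(last j components)) = 1 + sum(len(p) + 1) over them;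
--     # strictly increasing since every component is nonempty, so the best suffix count is
--     # found by binary search over this table instead of a greedy scan.
--     cost = [1]
--     for p in reversed(parts):
--         cost.append(cost[-1] + len(p) + 1)
--     lo, hi = 0, len(parts)
--     while lo < hi:
--         mid = (lo + hi + 1) // 2
--         if cost[mid] <= max_len:
--             lo = mid
--         else:
--             hi = mid - 1
--     if lo >= 2:
--         return "…/" + "/".join(parts[-lo:])
--     basename = parts[-1]
--     if len(basename) <= max_len:
--         return basename
--     if max_len >= 4:
--         return basename[: max_len - 3] + "..."
--     return basename[:max_len]
-- ===== Notes on version B (the rewrite author's own statement) =====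
-- stated objective: alternative
-- what changed: A grows the kept suffix one component at a time, rebuilding and re-measuring a '…/'-joined candidate string on every step; B instead precomputes a cumulative-cost table over the reversed components (cost of showing the last j components) and binary-searches that strictly increasing table for the largest fitting suffix count, joining once at the end; it also merges A's conditional backslash-normalization and duplicated split into one unconditional replace-and-split.
import Mathlib
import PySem

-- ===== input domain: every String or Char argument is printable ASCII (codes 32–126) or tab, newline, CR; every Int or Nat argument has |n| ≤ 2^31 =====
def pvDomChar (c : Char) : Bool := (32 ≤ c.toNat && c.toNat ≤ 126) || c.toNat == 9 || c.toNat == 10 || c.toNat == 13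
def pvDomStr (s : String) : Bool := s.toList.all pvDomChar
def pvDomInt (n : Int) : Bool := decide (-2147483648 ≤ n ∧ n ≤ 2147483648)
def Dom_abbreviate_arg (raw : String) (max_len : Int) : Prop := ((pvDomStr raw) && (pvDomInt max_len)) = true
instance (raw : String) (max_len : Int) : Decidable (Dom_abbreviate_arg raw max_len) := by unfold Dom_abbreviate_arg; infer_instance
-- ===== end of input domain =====

-- B replaces A's grow-a-suffix-and-rejoin loop by a precomputed cumulative-cost table and a
-- binary search for the largest fitting suffix count (objective: alternative decomposition).

-- ===== PORT A =====
-- the Python loop 'for i in range(len(parts)-2, -1, -1): … else break', carrying 'included'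
def pvALoop (parts : List (List Char)) (ml : Int) : List Int → List (List Char) → List (List Char)
  | [], included => included
  | i :: rest, included =>
      let candidate_parts := (PySem.List.pyGetD parts i []) :: included
      let candidate := "…/".toList ++ PySem.Chars.join "/".toList candidate_parts
      if (candidate.length : Int) ≤ ml then pvALoop parts ml rest candidate_parts
      else included

def abbreviate_arg (raw : String) (max_len : Int) : String :=
  let s := raw.toList
  if s = [] then raw
  else
    let is_path := PySem.Chars.isIn "/".toList s || PySem.Chars.isIn "\\".toList s
    if is_path then
      if (s.length : Int) ≤ max_len then raw
      else
        let parts :=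
          if PySem.Chars.isIn "\\".toList s then
            (PySem.Chars.splitOn (PySem.Chars.replace s "\\".toList "/".toList) "/".toList).filter (· ≠ [])
          else
            (PySem.Chars.splitOn s "/".toList).filter (· ≠ [])
        if parts = [] then raw
        else
          let basename := PySem.List.pyGetD parts (-1) []
          let included := pvALoop parts max_len
            (PySem.List.pyRange ((parts.length : Int) - 2) (-1) (-1)) [basename]
          -- shared fall-through: basename only, else truncated basename
          let fallback :=
            if (basename.length : Int) ≤ max_len then String.ofList basename
            else if 4 ≤ max_len then
              String.ofList (PySem.Chars.slice basename none (some (max_len - 3)) ++ "...".toList)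
            else String.ofList (PySem.Chars.slice basename none (some max_len))
          if 1 < included.length ∨ (included.length = 1 ∧ PySem.List.pyGetD included 0 [] ≠ basename) then
            let result := "…/".toList ++ PySem.Chars.join "/".toList included
            if (result.length : Int) ≤ max_len then String.ofList result else fallback
          else fallback
    else
      if max_len < (s.length : Int) then
        String.ofList (PySem.Chars.slice s none (some (max_len - 3)) ++ "...".toList)
      else raw

-- ===== PORT B =====
-- the Python line 'cost.append(cost[-1] + len(p) + 1)' (one step of the cumulative-cost table)
def pvBStep (acc : List Int) (p : List Char) : List Int :=
  acc ++ [PySem.List.pyGetD acc (-1) 0 + (p.length : Int) + 1]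

-- the Python line 'mid = (lo + hi + 1) // 2'
def pvMid (lo hi : Int) : Int := PySem.Int.floordiv (lo + hi + 1) 2

theorem pvMid_bounds {lo hi : Int} (h : lo < hi) : lo + 1 ≤ pvMid lo hi ∧ pvMid lo hi ≤ hi := by
  have hb := PySem.Int.floordiv_two_mid_bounds (show lo + 1 ≤ hi by omega)
  unfold pvMid
  rw [show lo + hi + 1 = (lo + 1) + hi by ring]
  exact hb

-- the Python loop 'while lo < hi: mid = …; if cost[mid] <= max_len: lo = mid else: hi = mid - 1'
def pvBSearch (cost : List Int) (ml : Int) (lo hi : Int) : Int :=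
  if h : lo < hi then
    if PySem.List.pyGetD cost (pvMid lo hi) 0 ≤ ml then pvBSearch cost ml (pvMid lo hi) hi
    else pvBSearch cost ml lo (pvMid lo hi - 1)
  else lo
termination_by (hi - lo).toNat
decreasing_by
  · have hb := pvMid_bounds h; omega
  · have hb := pvMid_bounds h; omega

def abbreviate_arg_alt (raw : String) (max_len : Int) : String :=
  let s := raw.toList
  if s = [] then raw
  else if !(PySem.Chars.isIn "/".toList s || PySem.Chars.isIn "\\".toList s) then
    if max_len < (s.length : Int) then
      String.ofList (PySem.Chars.slice s none (some (max_len - 3)) ++ "...".toList)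
    else raw
  else if (s.length : Int) ≤ max_len then raw
  else
    let parts := (PySem.Chars.splitOn (PySem.Chars.replace s "\\".toList "/".toList) "/".toList).filter (· ≠ [])
    if parts = [] then raw
    else
      let cost := parts.reverse.foldl pvBStep [1]
      let lo := pvBSearch cost max_len 0 (parts.length : Int)
      if 2 ≤ lo then
        String.ofList ("…/".toList ++ PySem.Chars.join "/".toList (PySem.List.slice parts (some (-lo)) none))
      else
        let basename := PySem.List.pyGetD parts (-1) []
        if (basename.length : Int) ≤ max_len then String.ofList basename
        else if 4 ≤ max_len then
          String.ofList (PySem.Chars.slice basename none (some (max_len - 3)) ++ "...".toList)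
        else String.ofList (PySem.Chars.slice basename none (some max_len))

-- ===== PRECONDITION & SPEC =====
def Spec_abbreviate_arg (raw : String) (max_len : Int) (out : String) : Prop := out = abbreviate_arg_alt raw max_len
instance (raw : String) (max_len : Int) (out : String) : Decidable (Spec_abbreviate_arg raw max_len out) := by unfold Spec_abbreviate_arg; infer_instance

-- ===== CLAIM (what is proved, stated in full; the proofs are below) =====
def Claim_equal_abbreviate_arg : Prop := ∀ (raw : String) (max_len : Int), Dom_abbreviate_arg raw max_len → Spec_abbreviate_arg raw max_len (abbreviate_arg raw max_len)

-- ===== LEMMAS AND PROOFS =====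

-- replace with an absent pattern is the identity
theorem pv_replace_go_id (old new : List Char) :
    ∀ (fuel : Nat) (l acc : List Char), ¬ old <:+: l →
      PySem.Chars.replace.go old new fuel l acc = acc.reverse ++ l := by
  intro fuel
  induction fuel with
  | zero => intro l acc _; simp [PySem.Chars.replace.go]
  | succ n ih =>
    intro l acc h
    cases l with
    | nil => simp [PySem.Chars.replace.go]
    | cons c t =>
      have hpre : old.isPrefixOf (c :: t) = false := by
        cases hp : old.isPrefixOf (c :: t)
        · rfl
        · exact absurd ((List.isPrefixOf_iff_prefix.mp hp).isInfix) h
      rw [PySem.Chars.replace.go]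
      simp only [hpre]
      rw [ih t (c :: acc) (fun hi => h (hi.trans (List.suffix_cons c t).isInfix))]
      simp

theorem pv_replace_id (s old new : List Char) (hold : old ≠ []) (h : ¬ old <:+: s) :
    PySem.Chars.replace s old new = s := by
  unfold PySem.Chars.replace
  rw [if_neg (by simpa [List.isEmpty_iff] using hold)]
  simpa using pv_replace_go_id old new s.length s [] h

def pvCost (l : List (List Char)) : Nat := (l.map (fun p => p.length + 1)).sum

theorem pvCost_reverse (l : List (List Char)) : pvCost l.reverse = pvCost l := by
  simp [pvCost]

theorem pv_join_len (S : List (List Char)) (p : List Char) :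
    (PySem.Chars.join "/".toList (p :: S)).length = p.length + pvCost S := by
  induction S generalizing p with
  | nil => simp [PySem.Chars.join_singleton, pvCost]
  | cons q S ih =>
    rw [PySem.Chars.join_cons_cons]
    simp only [List.length_append, ih q]
    simp [pvCost]
    ring

theorem pv_join_len' (L : List (List Char)) (hL : L ≠ []) :
    (PySem.Chars.join "/".toList L).length + 1 = pvCost L := by
  cases L with
  | nil => exact absurd rfl hL
  | cons p S => rw [pv_join_len]; simp [pvCost]; omega

theorem pvCost_append (l1 l2 : List (List Char)) : pvCost (l1 ++ l2) = pvCost l1 + pvCost l2 := by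
  simp [pvCost]

-- the number of further components the greedy scan accepts (A's loop, abstracted)
def pvTakeFit (ml : Int) : List (List Char) → Int → Nat
  | [], _ => 0
  | p :: rest, total =>
      if ml < total + p.length + 1 then 0
      else pvTakeFit ml rest (total + p.length + 1) + 1

theorem pvTakeFit_le (ml : Int) (rev : List (List Char)) :
    ∀ total, pvTakeFit ml rev total ≤ rev.length := by
  induction rev with
  | nil => intro total; simp [pvTakeFit]
  | cons p rest ih =>
    intro total
    simp only [pvTakeFit, List.length_cons]
    split
    · omega
    · exact Nat.succ_le_succ (ih _)

theorem pvTakeFit_zero_of_gt (ml : Int) (rev : List (List Char)) (total : Int)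
    (h : ml < total) : pvTakeFit ml rev total = 0 := by
  cases rev with
  | nil => simp [pvTakeFit]
  | cons p rest =>
    simp only [pvTakeFit]
    rw [if_pos (by have : (0:Int) ≤ (p.length : Int) := Int.natCast_nonneg _; omega)]

theorem pvTakeFit_bound (ml : Int) (rev : List (List Char)) :
    ∀ total, 0 < pvTakeFit ml rev total →
      total + (pvCost (rev.take (pvTakeFit ml rev total)) : Int) ≤ ml := by
  induction rev with
  | nil => intro total h; simp [pvTakeFit] at h
  | cons p rest ih =>
    intro total h
    by_cases hc : ml < total + (p.length : Int) + 1
    · simp only [pvTakeFit, if_pos hc] at h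
      omega
    · simp only [pvTakeFit, if_neg hc] at h ⊢
      rw [List.take_succ_cons]
      by_cases h0 : 0 < pvTakeFit ml rest (total + p.length + 1)
      · have := ih (total + p.length + 1) h0
        simp only [pvCost, List.map_cons, List.sum_cons] at *
        push_cast at *
        omega
      · have hz : pvTakeFit ml rest (total + p.length + 1) = 0 := by omega
        rw [hz]
        simp only [List.take_zero, pvCost, List.map_cons, List.map_nil, List.sum_cons, List.sum_nil]
        push_cast
        omega

-- one past the greedy count does not fit
theorem pvTakeFit_break (ml : Int) (rev : List (List Char)) :
    ∀ total, pvTakeFit ml rev total < rev.length →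
      ml < total + (pvCost (rev.take (pvTakeFit ml rev total + 1)) : Int) := by
  induction rev with
  | nil => intro total h; simp [pvTakeFit] at h
  | cons p rest ih =>
    intro total h
    by_cases hc : ml < total + (p.length : Int) + 1
    · simp only [pvTakeFit, if_pos hc]
      rw [List.take_succ_cons, List.take_zero]
      simp only [pvCost, List.map_cons, List.map_nil, List.sum_cons, List.sum_nil]
      push_cast
      omega
    · simp only [pvTakeFit, if_neg hc] at h ⊢
      have hlt : pvTakeFit ml rest (total + p.length + 1) < rest.length := by
        simpa using h
      have := ih (total + p.length + 1) hlt
      rw [List.take_succ_cons]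
      simp only [pvCost, List.map_cons, List.sum_cons] at *
      push_cast at *
      omega

theorem pvCost_take_mono (l : List (List Char)) {j j' : Nat} (h : j ≤ j') :
    pvCost (l.take j) ≤ pvCost (l.take j') := by
  have hsplit : pvCost (l.take j') = pvCost ((l.take j').take j) + pvCost ((l.take j').drop j) := by
    rw [← pvCost_append, List.take_append_drop]
  rw [List.take_take, Nat.min_eq_left h] at hsplit
  omega

-- the cumulative-cost table: scan form
def pvScan (t : Int) : List (List Char) → List Int
  | [] => []
  | p :: r => (t + p.length + 1) :: pvScan (t + p.length + 1) r

theorem pv_getD_last_append (ys : List Int) (x : Int) :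
    PySem.List.pyGetD (ys ++ [x]) (-1) 0 = x := by
  rw [PySem.List.pyGetD_neg_ofNat (ys ++ [x]) 1 0 (by omega) (by simp)]
  simp

theorem pv_foldl_cost (l : List (List Char)) :
    ∀ (acc : List Int) (t : Int), PySem.List.pyGetD acc (-1) 0 = t →
      l.foldl pvBStep acc = acc ++ pvScan t l := by
  induction l with
  | nil => intro acc t _; simp [pvScan]
  | cons p r ih =>
    intro acc t ht
    simp only [List.foldl_cons, pvBStep, ht, pvScan]
    rw [ih (acc ++ [t + p.length + 1]) (t + p.length + 1) (pv_getD_last_append _ _)]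
    simp

theorem pvScan_getD (l : List (List Char)) :
    ∀ (t : Int) (j : Nat), j < l.length →
      (pvScan t l).getD j 0 = t + (pvCost (l.take (j + 1)) : Int) := by
  induction l with
  | nil => intro t j h; simp at h
  | cons p r ih =>
    intro t j h
    cases j with
    | zero =>
      simp only [pvScan, List.getD_cons_zero, List.take_succ_cons, List.take_zero]
      simp [pvCost]
      ring
    | succ j =>
      simp only [pvScan, List.getD_cons_succ]
      rw [ih _ j (by simpa using h)]
      rw [List.take_succ_cons]
      simp only [pvCost, List.map_cons, List.sum_cons]
      push_cast
      ring

theorem pv_cost_getD (rev : List (List Char)) (j : Nat) (hj : j ≤ rev.length) :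
    PySem.List.pyGetD (rev.foldl pvBStep [1]) (j : Int) 0 = 1 + (pvCost (rev.take j) : Int) := by
  rw [pv_foldl_cost rev [1] 1 (by decide), PySem.List.pyGetD_natCast]
  cases j with
  | zero => simp [pvCost]
  | succ j =>
    rw [show (([1] ++ pvScan 1 rev : List Int)) = 1 :: pvScan 1 rev from rfl]
    simp only [List.getD_cons_succ]
    exact pvScan_getD rev 1 j (by omega)

-- binary search over a table that answers '≤ ml exactly up to K' returns K
theorem pvBSearch_eq (cost : List Int) (ml : Int) (K n : Nat)
    (hP : ∀ j : Nat, 1 ≤ j → j ≤ n → (PySem.List.pyGetD cost (j : Int) 0 ≤ ml ↔ j ≤ K)) :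
    ∀ (fuel : Nat) (lo hi : Int), (hi - lo).toNat ≤ fuel → 0 ≤ lo → lo ≤ (K : Int) →
      (K : Int) ≤ hi → hi ≤ (n : Int) → pvBSearch cost ml lo hi = (K : Int) := by
  intro fuel
  induction fuel with
  | zero =>
    intro lo hi hf h0 hlK hKh hhn
    rw [pvBSearch, dif_neg (show ¬ lo < hi by omega)]
    omega
  | succ f ih =>
    intro lo hi hf h0 hlK hKh hhn
    rw [pvBSearch]
    by_cases hlh : lo < hi
    · rw [dif_pos hlh]
      have hb := pvMid_bounds hlh
      have hj : pvMid lo hi = (((pvMid lo hi).toNat : Nat) : Int) := by omega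
      have hiff := hP (pvMid lo hi).toNat (by omega) (by omega)
      rw [← hj] at hiff
      by_cases hc : PySem.List.pyGetD cost (pvMid lo hi) 0 ≤ ml
      · rw [if_pos hc]
        have hmK : (((pvMid lo hi).toNat : Nat) : Int) ≤ (K : Int) := by
          exact_mod_cast Nat.cast_le.mpr (hiff.mp hc)
        rw [← hj] at hmK
        exact ih (pvMid lo hi) hi (by omega) (by omega) hmK hKh hhn
      · rw [if_neg hc]
        have hKm : ¬ ((pvMid lo hi).toNat ≤ K) := fun hle => hc (hiff.mpr hle)
        have hKlt : (K : Int) < pvMid lo hi := by omega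
        exact ih lo (pvMid lo hi - 1) (by omega) h0 hlK (by omega) (by omega)
    · rw [dif_neg hlh]
      omega

theorem pv_getD_at_mid (rest : List (List Char)) (x : List Char) (S : List (List Char)) :
    PySem.List.pyGetD (rest.reverse ++ x :: S) ((rest.length : Int)) [] = x := by
  rw [PySem.List.pyGetD_natCast]
  rw [List.getD_eq_getElem?_getD, List.getElem?_append_right (by simp)]
  simp

theorem pvALoop_eq (ml : Int) :
    ∀ (rev S : List (List Char)), S ≠ [] →
      pvALoop (rev.reverse ++ S) ml (PySem.List.pyRange ((rev.length : Int) - 1) (-1) (-1)) S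
        = (rev.take (pvTakeFit ml rev (1 + (pvCost S : Int)))).reverse ++ S := by
  intro rev
  induction rev with
  | nil =>
    intro S hS
    rw [PySem.List.pyRange_neg_one_eq_nil (by norm_num)]
    simp [pvALoop]
  | cons p rest ih =>
    intro S hS
    have hlen : ((p :: rest).length : Int) - 1 = (rest.length : Int) := by
      push_cast [List.length_cons]; ring
    rw [hlen, PySem.List.pyRange_neg_one_cons (by omega)]
    simp only [pvALoop]
    have hparts : (p :: rest).reverse ++ S = rest.reverse ++ p :: S := by simp
    rw [hparts, pv_getD_at_mid]
    have hcand : (("…/".toList ++ PySem.Chars.join "/".toList (p :: S)).length : Int)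
        = (1 + (pvCost S : Int)) + p.length + 1 := by
      rw [List.length_append, pv_join_len]
      rw [(by decide : "…/".toList.length = 2)]
      push_cast
      ring_nf
    simp only [pvTakeFit, hcand]
    by_cases hfit : (1 + (pvCost S : Int)) + p.length + 1 ≤ ml
    · rw [if_pos hfit, if_neg (by omega)]
      have hS' : p :: S ≠ [] := by simp
      have hc : (1 : Int) + (pvCost (p :: S) : Int) = (1 + (pvCost S : Int)) + p.length + 1 := by
        simp [pvCost]; ring
      have := ih (p :: S) hS'
      rw [hc] at this
      rw [this]
      simp [List.take_succ_cons]
    · rw [if_neg hfit, if_pos (by omega)]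
      simp

-- ===== VERDICT (by name: the statement is the Claim_ definition above) =====
theorem abbreviate_arg_spec : Claim_equal_abbreviate_arg := by
  intro raw max_len _
  unfold Spec_abbreviate_arg abbreviate_arg abbreviate_arg_alt
  set s := raw.toList with hs
  by_cases h0 : s = []
  · simp [h0]
  rw [if_neg h0, if_neg h0]
  by_cases hp : (PySem.Chars.isIn "/".toList s || PySem.Chars.isIn "\\".toList s) = true
  · rw [if_pos hp]
    simp only [hp, Bool.not_true, if_neg (by simp : ¬ (false = true))]
    by_cases hfit : (s.length : Int) ≤ max_len
    · rw [if_pos hfit, if_pos hfit]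
    rw [if_neg hfit, if_neg hfit]
    -- the two 'parts' agree
    have hparts_eq :
        (if PySem.Chars.isIn "\\".toList s then
            (PySem.Chars.splitOn (PySem.Chars.replace s "\\".toList "/".toList) "/".toList).filter (· ≠ [])
          else
            (PySem.Chars.splitOn s "/".toList).filter (· ≠ []))
        = (PySem.Chars.splitOn (PySem.Chars.replace s "\\".toList "/".toList) "/".toList).filter (· ≠ []) := by
      by_cases hb : PySem.Chars.isIn "\\".toList s = true
      · rw [if_pos hb]
      · rw [if_neg hb,
          pv_replace_id s "\\".toList "/".toList (by decide)
            ((PySem.Chars.isIn_eq_false_iff _ _).mp (by simpa using hb))]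
    rw [hparts_eq]
    set parts := (PySem.Chars.splitOn (PySem.Chars.replace s "\\".toList "/".toList) "/".toList).filter (· ≠ []) with hpartsdef
    by_cases hpe : parts = []
    · rw [if_pos hpe, if_pos hpe]
    rw [if_neg hpe, if_neg hpe]
    -- decompose parts from the right
    obtain ⟨rest, b, hrev⟩ : ∃ (rest : List (List Char)) (b : List Char), parts = rest.reverse ++ [b] := by
      rcases List.eq_nil_or_concat parts with h | ⟨ys, y, hy⟩
      · exact absurd h hpe
      · exact ⟨ys.reverse, y, by simp [hy]⟩
    have hbasename : PySem.List.pyGetD parts (-1) [] = b := by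
      rw [hrev]
      rw [PySem.List.pyGetD_neg_ofNat (rest.reverse ++ [b]) 1 [] (by omega) (by simp)]
      simp
    rw [hbasename]
    -- A's loop result
    have hstart : ((parts.length : Int)) - 2 = ((rest.length : Int)) - 1 := by
      rw [hrev]
      simp only [List.length_append, List.length_reverse, List.length_cons, List.length_nil]
      push_cast; ring
    have hA : pvALoop parts max_len (PySem.List.pyRange ((parts.length : Int) - 2) (-1) (-1)) [b]
        = (rest.take (pvTakeFit max_len rest (1 + (pvCost [b] : Int)))).reverse ++ [b] := by
      rw [hstart]
      conv_lhs => rw [hrev]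
      exact pvALoop_eq max_len rest [b] (by simp)
    set m := pvTakeFit max_len rest (1 + (pvCost [b] : Int)) with hm
    have hmle : m ≤ rest.length := pvTakeFit_le _ _ _
    have hcostb : (1 : Int) + (pvCost [b] : Int) = (b.length : Int) + 2 := by
      simp [pvCost]; ring
    have hbr : parts.reverse = b :: rest := by rw [hrev]; simp
    have hnlen : parts.length = rest.length + 1 := by rw [hrev]; simp
    -- B's binary search equals the greedy suffix count K
    set K := pvTakeFit max_len (b :: rest) 1 with hKdef
    have hKle : K ≤ rest.length + 1 := by
      have := pvTakeFit_le max_len (b :: rest) 1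
      simpa using this
    have hK : (K : Int) = if max_len < (b.length : Int) + 2 then 0 else (m : Int) + 1 := by
      rw [hKdef]
      simp only [pvTakeFit]
      by_cases hb2 : max_len < (b.length : Int) + 2
      · rw [if_pos (by omega), if_pos hb2]
        simp
      · rw [if_neg (by omega), if_neg hb2]
        have htot : (1 : Int) + (b.length : Int) + 1 = 1 + (pvCost [b] : Int) := by
          simp [pvCost]; ring
        rw [htot, ← hm]
        push_cast
        ring
    have hP : ∀ j : Nat, 1 ≤ j → j ≤ parts.length →
        (PySem.List.pyGetD (parts.reverse.foldl pvBStep [1]) (j : Int) 0 ≤ max_len ↔ j ≤ K) := by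
      intro j h1 hjn
      rw [hbr]
      rw [pv_cost_getD (b :: rest) j (by simpa [hnlen] using hjn)]
      constructor
      · intro hle
        by_contra hgt
        rw [not_le] at hgt
        have hKlt : K < (b :: rest).length := by
          simp only [List.length_cons]
          omega
        have hbreak := pvTakeFit_break max_len (b :: rest) 1 hKlt
        rw [← hKdef] at hbreak
        have hmono := pvCost_take_mono (b :: rest) (show K + 1 ≤ j by omega)
        omega
      · intro hjK
        have h0K : 0 < K := by omega
        have hbd := pvTakeFit_bound max_len (b :: rest) 1 h0K
        rw [← hKdef] at hbd
        have hmono := pvCost_take_mono (b :: rest) hjK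
        omega
    have hkB : pvBSearch (parts.reverse.foldl pvBStep [1]) max_len 0 (parts.length : Int)
        = if max_len < (b.length : Int) + 2 then 0 else (m : Int) + 1 := by
      rw [← hK]
      exact pvBSearch_eq (parts.reverse.foldl pvBStep [1]) max_len K parts.length hP
        parts.length 0 (parts.length : Int) (by omega) (by omega)
        (by exact_mod_cast Nat.cast_le.mpr (by omega : (0:Nat) ≤ K))
        (by exact_mod_cast Nat.cast_le.mpr (by omega : K ≤ parts.length)) (by omega)
    rw [hA, hkB]
    by_cases hb2 : max_len < (b.length : Int) + 2
    · -- search result 0; A's m = 0 too → both take the shared basename fall-through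
      rw [if_pos hb2]
      have hm0 : m = 0 := by
        rw [hm]; exact pvTakeFit_zero_of_gt _ _ _ (by rw [hcostb]; omega)
      rw [hm0]
      simp only [List.take_zero, List.reverse_nil, List.nil_append]
      rw [if_neg (show ¬ (1 < ([b] : List (List Char)).length ∨ (([b] : List (List Char)).length = 1 ∧ PySem.List.pyGetD [b] (0 : Int) [] ≠ b)) from by
        simp [PySem.List.pyGetD, PySem.List.pyGet?, PySem.List.pyIdx?])]
      rw [if_neg (show ¬ ((2 : Int) ≤ 0) from by norm_num)]
    · rw [if_neg hb2]
      by_cases hm0 : m = 0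
      · -- search result 1 < 2, A's included = [b] → both take the basename fall-through
        rw [hm0]
        simp only [List.take_zero, List.reverse_nil, List.nil_append]
        rw [if_neg (show ¬ (1 < ([b] : List (List Char)).length ∨ (([b] : List (List Char)).length = 1 ∧ PySem.List.pyGetD [b] (0 : Int) [] ≠ b)) from by
          simp [PySem.List.pyGetD, PySem.List.pyGet?, PySem.List.pyIdx?])]
        rw [if_neg (show ¬ ((2 : Int) ≤ ((0 : Nat) : Int) + 1) from by norm_num)]
      · -- m ≥ 1, search result m + 1 ≥ 2: both return the joined trailing components
        have hm1 : 1 ≤ m := Nat.one_le_iff_ne_zero.mpr hm0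
        have hincl_len : ((rest.take m).reverse ++ [b]).length = m + 1 := by
          simp [Nat.min_eq_left hmle]
        rw [if_pos (show (2 : Int) ≤ (m : Int) + 1 from by omega)]
        rw [if_pos (show 1 < ((rest.take m).reverse ++ [b]).length ∨ (((rest.take m).reverse ++ [b]).length = 1 ∧ PySem.List.pyGetD ((rest.take m).reverse ++ [b]) (0 : Int) [] ≠ b) from
          Or.inl (by rw [hincl_len]; omega))]
        -- the rebuilt candidate fits (A's re-check)
        have hbound := pvTakeFit_bound max_len rest (1 + (pvCost [b] : Int)) (by omega)
        rw [← hm] at hbound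
        have hres_len : ((("…/".toList ++ PySem.Chars.join "/".toList ((rest.take m).reverse ++ [b])).length : Int))
            = (1 + (pvCost [b] : Int)) + (pvCost (rest.take m) : Int) := by
          have hj : (PySem.Chars.join ['/'] ((rest.take m).reverse ++ [b])).length + 1
              = pvCost ((rest.take m).reverse ++ [b]) := pv_join_len' ((rest.take m).reverse ++ [b]) (by simp)
          have h2 : pvCost ((rest.take m).reverse ++ [b]) = pvCost (rest.take m) + pvCost [b] := by
            rw [pvCost_append, pvCost_reverse]
          rw [List.length_append, (by decide : "…/".toList.length = 2)]
          push_cast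
          omega
        rw [if_pos (show ((("…/".toList ++ PySem.Chars.join "/".toList ((rest.take m).reverse ++ [b])).length : Int)) ≤ max_len from by
          rw [hres_len]; omega)]
        -- B's slice is exactly A's included suffix
        have hslice : PySem.List.slice parts (some (-((m : Int) + 1))) none
            = (rest.take m).reverse ++ [b] := by
          have hcast : -((m : Int) + 1) = -(((m + 1 : Nat) : Int)) := by push_cast; ring
          rw [hcast, PySem.List.slice_from_neg_natCast _ _ (by omega)]
          rw [hrev]
          have hlen2 : (rest.reverse ++ [b]).length = rest.length + 1 := by simp
          rw [hlen2]
          have hdrop : rest.length + 1 - (m + 1) = rest.length - m := by omega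
          rw [hdrop, List.drop_append_of_le_length (by simp)]
          rw [List.drop_reverse]
          have hmm : rest.length - (rest.length - m) = m := by omega
          rw [hmm]
        rw [hslice]
  · have hpf : (PySem.Chars.isIn "/".toList s || PySem.Chars.isIn "\\".toList s) = false :=
      eq_false_of_ne_true hp
    rw [if_neg hp, if_pos (show (!(PySem.Chars.isIn "/".toList s || PySem.Chars.isIn "\\".toList s)) = true from by rw [hpf]; rfl)]
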